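-- pv_equiv track=rewrite | github.com/BuiHoanDuy/Nutrition_ML_API | services/meal_plan_inference.py | _shrink_repeated_chars
-- ===== SOURCE A (Python) =====
-- def _shrink_repeated_chars(token: str, max_repeats: int = 2) -> str:
--     """Shrink runs of repeated characters to at most max_repeats (to handle 'tieeeeuu')."""
--     if len(token) <= 2:
--         return token
--     result = [token[0]]
--     count = 1
--     for ch in token[1:]:
--         if ch == result[-1]:
--             if count < max_repeats:
--                 result.append(ch)
--             count += 1
--         else:
--             result.append(ch)
--             count = 1
--     return "".join(result)
-- ===== SOURCE B (Python) =====
-- def _shrink_repeated_chars(token: str, max_repeats: int = 2) -> str: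
--     """Shrink runs of repeated characters to at most max_repeats (to handle 'tieeeeuu')."""
--     if len(token) <= 2:
--         return token
--     pieces = []
--     i = 0
--     n = len(token)
--     while i < n:
--         j = i
--         while j < n and token[j] == token[i]:
--             j += 1
--         pieces.append(token[i] * max(1, min(j - i, max_repeats)))
--         i = j
--     return "".join(pieces)
-- ===== Notes on version B (the rewrite author's own statement) =====
-- stated objective: alternative
-- what changed: B splits the token into maximal runs of equal characters with a two-pointer scan and emits max(1, min(run_length, max_repeats)) copies per run, replacing A's char-by-char loop that keeps a running count and compares each char against result[-1].
import Mathlib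
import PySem

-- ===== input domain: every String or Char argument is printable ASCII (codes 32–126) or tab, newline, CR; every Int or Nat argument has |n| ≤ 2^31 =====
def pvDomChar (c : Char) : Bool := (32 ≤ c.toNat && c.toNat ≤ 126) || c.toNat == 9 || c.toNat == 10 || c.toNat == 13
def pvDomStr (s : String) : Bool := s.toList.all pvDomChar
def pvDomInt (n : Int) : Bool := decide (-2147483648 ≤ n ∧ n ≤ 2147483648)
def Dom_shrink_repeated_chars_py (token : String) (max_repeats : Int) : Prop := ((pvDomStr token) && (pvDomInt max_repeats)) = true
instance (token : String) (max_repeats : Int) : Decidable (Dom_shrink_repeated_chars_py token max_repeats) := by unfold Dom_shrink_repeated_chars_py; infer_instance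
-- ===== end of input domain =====

-- B rebuilds the token from its maximal runs of equal characters (two-pointer run scan,
-- one emission per run) instead of A's char-by-char running count against result[-1];
-- objective: alternative decomposition, same cost.

-- ===== PORT A =====
-- loop body of A: result[-1] is read as Python's result[-1] (result is never empty here)
def pvStepA (m : Int) (st : List Char × Int) (ch : Char) : List Char × Int :=
  if ch == PySem.List.pyGetD st.1 (-1) ' ' then
    (if st.2 < m then st.1 ++ [ch] else st.1, st.2 + 1)
  else
    (st.1 ++ [ch], 1)

def shrink_repeated_chars_py (token : String) (max_repeats : Int) : String :=
  if PySem.Str.len token ≤ 2 then token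
  else
    match token.toList with
    | [] => token  -- unreachable: len(token) > 2
    | c0 :: rest =>
      String.ofList ((rest.foldl (pvStepA max_repeats) ([c0], 1)).1)

-- ===== PORT B =====
-- the inner while loop of B: split off one maximal run (run char, run length)
def pvRuns : List Char → List (Char × Nat)
  | [] => []
  | c :: rest =>
    let n := (rest.takeWhile (· == c)).length
    (c, n + 1) :: pvRuns (rest.drop n)
termination_by cs => cs.length
decreasing_by simp

def shrink_repeated_chars_py_alt (token : String) (max_repeats : Int) : String :=
  if PySem.Str.len token ≤ 2 then token
  else
    String.ofList ((pvRuns token.toList).flatMap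
      (fun r => List.replicate (max 1 (min (r.2 : Int) max_repeats)).toNat r.1))

-- ===== PRECONDITION & SPEC =====
def Spec_shrink_repeated_chars_py (token : String) (max_repeats : Int) (out : String) : Prop := out = shrink_repeated_chars_py_alt token max_repeats
instance (token : String) (max_repeats : Int) (out : String) : Decidable (Spec_shrink_repeated_chars_py token max_repeats out) := by unfold Spec_shrink_repeated_chars_py; infer_instance

-- ===== CLAIM (what is proved, stated in full; the proofs are below) =====
def Claim_equal_shrink_repeated_chars_py : Prop := ∀ (token : String) (max_repeats : Int), Dom_shrink_repeated_chars_py token max_repeats → Spec_shrink_repeated_chars_py token max_repeats (shrink_repeated_chars_py token max_repeats)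

-- ===== LEMMAS AND PROOFS =====

-- what A's loop appends after the seed: characters emitted while scanning cs with
-- current-run char a and current-run count k
def pvEmit (m : Int) : List Char → Char → Int → List Char
  | [], _, _ => []
  | c :: cs, a, k =>
    if c = a then (if k < m then [c] else []) ++ pvEmit m cs a (k + 1)
    else c :: pvEmit m cs c 1

lemma foldA (m : Int) : ∀ (cs r : List Char) (a : Char) (k : Int),
    PySem.List.pyGetD r (-1) ' ' = a → r ≠ [] →
    (cs.foldl (pvStepA m) (r, k)).1 = r ++ pvEmit m cs a k := by
  intro cs
  induction cs with
  | nil => intro r a k _ _; simp [pvEmit]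
  | cons c cs ih =>
    intro r a k hlast hne
    by_cases hc : c = a
    · subst hc
      by_cases hk : k < m
      · have h2 := ih (r ++ [c]) c (k + 1)
          (PySem.List.pyGetD_neg_one_append_singleton r c ' ') (by simp)
        simp [pvStepA, hlast, hk, pvEmit, h2]
      · have h2 := ih r c (k + 1) hlast hne
        simp [pvStepA, hlast, hk, pvEmit, h2]
    · have h2 := ih (r ++ [c]) c 1
        (PySem.List.pyGetD_neg_one_append_singleton r c ' ') (by simp)
      simp [pvStepA, hlast, hc, pvEmit, h2]

lemma emit_run (m : Int) : ∀ (j : Nat) (cs : List Char) (a : Char) (k : Int),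
    pvEmit m (List.replicate j a ++ cs) a k
      = List.replicate (min (k + j) m - k).toNat a ++ pvEmit m cs a (k + j) := by
  intro j
  induction j with
  | zero => intro cs a k; simp
  | succ j ih =>
    intro cs a k
    rw [List.replicate_succ, List.cons_append]
    simp only [pvEmit]
    rw [ih cs a (k + 1)]
    have harith : ((k + 1 : Int) + j) = k + ((j + 1 : Nat) : Int) := by push_cast; ring
    rw [harith]
    by_cases hk : k < m
    · rw [if_pos hk]
      have hcount : (min (k + ((j + 1 : Nat) : Int)) m - k).toNat
          = (min (k + 1 + (j : Int)) m - (k + 1)).toNat + 1 := by push_cast; omega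
      rw [hcount, List.replicate_succ]
      simp
      omega
    · rw [if_neg hk]
      have hcount : (min (k + ((j + 1 : Nat) : Int)) m - k).toNat
          = (min (k + 1 + (j : Int)) m - (k + 1)).toNat := by push_cast; omega
      rw [hcount]
      simp
      omega

lemma emit_runs (m : Int) : ∀ (N : Nat) (cs : List Char) (c : Char), cs.length ≤ N →
    c :: pvEmit m cs c 1
      = (pvRuns (c :: cs)).flatMap
          (fun r => List.replicate (max 1 (min (r.2 : Int) m)).toNat r.1) := by
  intro N
  induction N with
  | zero =>
    intro cs c h
    have hnil : cs = [] := List.eq_nil_of_length_eq_zero (Nat.le_zero.mp h)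
    subst hnil
    rw [pvRuns]
    simp only [List.takeWhile_nil, List.length_nil, List.drop_nil, pvRuns,
      List.flatMap_cons, List.flatMap_nil, List.append_nil, pvEmit]
    rw [show (max 1 (min ((0 + 1 : Nat) : Int) m)).toNat
          = (min (1 + (0 : Nat) : Int) m - 1).toNat + 1 by push_cast; omega]
    simp [List.replicate_succ]
  | succ N ih =>
    intro cs c h
    have hruns : pvRuns (c :: cs) = (c, (cs.takeWhile (· == c)).length + 1)
        :: pvRuns (cs.drop (cs.takeWhile (· == c)).length) := by rw [pvRuns]
    generalize hn : (cs.takeWhile (· == c)).length = n at hruns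
    have htw : cs.takeWhile (· == c) = List.replicate n c := by
      rw [List.eq_replicate_iff]
      refine ⟨hn, fun b hb => ?_⟩
      simpa using List.mem_takeWhile_imp hb
    have hsplit : cs = List.replicate n c ++ cs.dropWhile (· == c) := by
      conv_lhs => rw [← List.takeWhile_append_dropWhile (p := (· == c)) (l := cs)]
      rw [htw]
    have hdrop : cs.drop n = cs.dropWhile (· == c) := by
      conv_lhs => rw [hsplit]
      simp
    rw [hruns, hdrop]
    conv_lhs => rw [hsplit]
    rw [emit_run]
    have hcnt : (max 1 (min ((n + 1 : Nat) : Int) m)).toNat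
        = (min (1 + (n : Nat) : Int) m - 1).toNat + 1 := by push_cast; omega
    rcases hd : cs.dropWhile (· == c) with _ | ⟨c', tail⟩
    · simp only [pvEmit, pvRuns, List.flatMap_nil, List.append_nil, List.flatMap_cons]
      rw [hcnt, List.replicate_succ]
    · have hc' : ¬ (c' == c) = true := by
        have hh := List.head?_dropWhile_not (p := (· == c)) (l := cs)
        rw [hd] at hh
        simpa using hh
      simp only [pvEmit]
      rw [if_neg (by simpa using hc')]
      have hlen : tail.length ≤ N := by
        have h1 : cs.length = n + (c' :: tail).length := by
          conv_lhs => rw [hsplit, hd]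
          simp
        simp at h1
        omega
      rw [ih tail c' hlen, List.flatMap_cons]
      simp only
      rw [hcnt, List.replicate_succ]
      simp

-- ===== VERDICT (by name: the statement is the Claim_ definition above) =====
theorem shrink_repeated_chars_py_spec : Claim_equal_shrink_repeated_chars_py := by
  intro token m _
  unfold Spec_shrink_repeated_chars_py shrink_repeated_chars_py shrink_repeated_chars_py_alt
  by_cases hlen : PySem.Str.len token ≤ 2
  · rw [if_pos hlen, if_pos hlen]
  · rw [if_neg hlen, if_neg hlen]
    have hlen' : 2 < (token.toList.length : Int) := by
      simpa [PySem.Str.len_eq] using lt_of_not_ge hlen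
    rcases hcs : token.toList with _ | ⟨c0, rest⟩
    · rw [hcs] at hlen'; simp at hlen'
    · simp only
      rw [foldA m rest [c0] c0 1
          (by simpa using PySem.List.pyGetD_neg_one_append_singleton [] c0 ' ') (by simp)]
      rw [show ([c0] : List Char) ++ pvEmit m rest c0 1 = c0 :: pvEmit m rest c0 1 by simp]
      rw [emit_runs m rest.length rest c0 le_rfl]
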